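-- pv_equiv track=rewrite | github.com/cds-snc/notification-utils | notifications_utils/system_status.py | determine_notification_status
-- ===== SOURCE A (Python) =====
-- TEMPLATES = {
--     "email": {
--         "low": "73079cb9-c169-44ea-8cf4-8d397711cc9d",
--         "medium": "c75c4539-3014-4c4c-96b5-94d326758a74",
--         "high": "276da251-3103-49f3-9054-cbf6b5d74411",
--     },
--     "sms": {
--         "low": "ab3a603b-d602-46ea-8c83-e05cb280b950",
--         "medium": "a48b54ce-40f6-4e4a-abe8-1e2fa389455b",
--         "high": "4969a9e9-ddfd-476e-8b93-6231e6f1be4a",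
--     },
-- }
--
-- THRESHOLDS = {
--     "email-low": 3 * 60 * 60 * 1000,  # 3 hours
--     "email-medium": 45 * 60 * 1000,  # 45 minutes
--     "email-high": 60 * 1000,  # 60 seconds
--     "sms-low": 3 * 60 * 60 * 1000,  # 3 hours
--     "sms-medium": 45 * 60 * 1000,  # 45 minutes
--     "sms-high": 60 * 1000,  # 60 seconds
--     "api": 400,  # 400ms
--     "admin": 400,  # 400ms
-- }
--
-- def determine_notification_status(dbresults):  # noqa: C901
--     # default all to down
--     email_status_low = "down"
--     email_status_medium = "down"
--     email_status_high = "down"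
--     sms_status_low = "down"
--     sms_status_medium = "down"
--     sms_status_high = "down"
--
--     for row in dbresults:
--         if str(row[0]) == TEMPLATES["email"]["low"]:
--             email_low_response_time = row[1]
--             if email_low_response_time <= THRESHOLDS["email-low"]:
--                 email_status_low = "up"
--             else:
--                 email_status_low = "degraded"
--
--         elif str(row[0]) == TEMPLATES["email"]["medium"]:
--             email_medium_response_time = row[1]
--             if email_medium_response_time <= THRESHOLDS["email-medium"]:
--                 email_status_medium = "up"
--             else:
--                 email_status_medium = "degraded"
--
--         elif str(row[0]) == TEMPLATES["email"]["high"]: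
--             email_high_response_time = row[1]
--             if email_high_response_time <= THRESHOLDS["email-high"]:
--                 email_status_high = "up"
--             else:
--                 email_status_high = "degraded"
--
--         elif str(row[0]) == TEMPLATES["sms"]["low"]:
--             sms_low_response_time = row[1]
--             if sms_low_response_time <= THRESHOLDS["sms-low"]:
--                 sms_status_low = "up"
--             else:
--                 sms_status_low = "degraded"
--
--         elif str(row[0]) == TEMPLATES["sms"]["medium"]:
--             sms_medium_response_time = row[1]
--             if sms_medium_response_time <= THRESHOLDS["sms-medium"]:
--                 sms_status_medium = "up"
--             else:
--                 sms_status_medium = "degraded"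
--
--         elif str(row[0]) == TEMPLATES["sms"]["high"]:
--             sms_high_response_time = row[1]
--             if sms_high_response_time <= THRESHOLDS["sms-high"]:
--                 sms_status_high = "up"
--             else:
--                 sms_status_high = "degraded"
--
--     # set overall email_status based on if one of email_status_low, email_status_medium, email_status_high is down,
--     # then email_status is down, if one is degraded, then email_status is degraded, otherwise email_status is up
--     if email_status_low == "down" or email_status_medium == "down" or email_status_high == "down":
--         email_status = "down"
--     elif email_status_low == "degraded" or email_status_medium == "degraded" or email_status_high == "degraded":
--         email_status = "degraded"
--     else:
--         email_status = "up"
--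
--     # set overall sms_status based on if one of sms_status_low, sms_status_medium, sms_status_high is down,
--     # then sms_status is down, if one is degraded, then sms_status is degraded, otherwise sms_status is up
--     if sms_status_low == "down" or sms_status_medium == "down" or sms_status_high == "down":
--         sms_status = "down"
--     elif sms_status_low == "degraded" or sms_status_medium == "degraded" or sms_status_high == "degraded":
--         sms_status = "degraded"
--     else:
--         sms_status = "up"
--
--     return (email_status, sms_status)
-- ===== SOURCE B (Python) =====
-- TEMPLATES = {
--     "email": {
--         "low": "73079cb9-c169-44ea-8cf4-8d397711cc9d",
--         "medium": "c75c4539-3014-4c4c-96b5-94d326758a74",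
--         "high": "276da251-3103-49f3-9054-cbf6b5d74411",
--     },
--     "sms": {
--         "low": "ab3a603b-d602-46ea-8c83-e05cb280b950",
--         "medium": "a48b54ce-40f6-4e4a-abe8-1e2fa389455b",
--         "high": "4969a9e9-ddfd-476e-8b93-6231e6f1be4a",
--     },
-- }
--
-- THRESHOLDS = {
--     "email-low": 3 * 60 * 60 * 1000,
--     "email-medium": 45 * 60 * 1000,
--     "email-high": 60 * 1000,
--     "sms-low": 3 * 60 * 60 * 1000,
--     "sms-medium": 45 * 60 * 1000,
--     "sms-high": 60 * 1000,
--     "api": 400,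
--     "admin": 400,
-- }
--
-- _RANK = {"down": 0, "degraded": 1, "up": 2}
--
--
-- def _level_status(dbresults, template_id, threshold):
--     # last report for this template wins: scan from the end, stop at first hit
--     for row in reversed(dbresults):
--         if str(row[0]) == template_id:
--             return "up" if row[1] <= threshold else "degraded"
--     return "down"
--
--
-- def determine_notification_status(dbresults):
--     overall = []
--     for channel in ("email", "sms"):
--         levels = [
--             _level_status(dbresults, TEMPLATES[channel][lvl], THRESHOLDS[f"{channel}-{lvl}"])
--             for lvl in ("low", "medium", "high")
--         ]
--         overall.append(min(levels, key=_RANK.get))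
--     return tuple(overall)
-- ===== Notes on version B (the rewrite author's own statement) =====
-- stated objective: alternative
-- what changed: B inverts the loop structure: instead of one forward pass classifying every row against six ids into six status variables, it runs one reverse scan per template to find that template's last report (six staged searches), and aggregates each channel with a generic min-by-severity-rank instead of two hand-written if/elif chains.
import Mathlib
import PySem

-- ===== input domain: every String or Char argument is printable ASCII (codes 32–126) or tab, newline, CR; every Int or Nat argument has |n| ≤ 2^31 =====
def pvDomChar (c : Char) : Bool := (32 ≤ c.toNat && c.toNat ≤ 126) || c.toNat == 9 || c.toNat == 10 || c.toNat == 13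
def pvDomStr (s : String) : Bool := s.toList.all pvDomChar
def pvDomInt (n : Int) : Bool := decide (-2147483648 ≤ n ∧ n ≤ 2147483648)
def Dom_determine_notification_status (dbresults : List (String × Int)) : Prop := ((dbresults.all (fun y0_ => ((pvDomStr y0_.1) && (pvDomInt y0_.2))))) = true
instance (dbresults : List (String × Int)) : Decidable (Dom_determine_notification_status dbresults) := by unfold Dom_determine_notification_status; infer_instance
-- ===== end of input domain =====

-- B inverts the loop: one reverse scan per template finding its last report (instead of A's
-- single forward pass classifying each row into six variables), then a generic min-by-severity
-- rank per channel instead of hand-written if/elif chains (objective: alternative).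

-- ===== PORT A =====
-- constant dict lookups TEMPLATES[...][...] / THRESHOLDS[...] inlined as the literal values they denote
def aStep (st : String × String × String × String × String × String) (row : String × Int) :
    String × String × String × String × String × String :=
  match st with
  | (el, em, eh, sl, sm, sh) =>
    if row.1 = "73079cb9-c169-44ea-8cf4-8d397711cc9d" then
      ((if row.2 ≤ 10800000 then "up" else "degraded"), em, eh, sl, sm, sh)
    else if row.1 = "c75c4539-3014-4c4c-96b5-94d326758a74" then
      (el, (if row.2 ≤ 2700000 then "up" else "degraded"), eh, sl, sm, sh)
    else if row.1 = "276da251-3103-49f3-9054-cbf6b5d74411" then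
      (el, em, (if row.2 ≤ 60000 then "up" else "degraded"), sl, sm, sh)
    else if row.1 = "ab3a603b-d602-46ea-8c83-e05cb280b950" then
      (el, em, eh, (if row.2 ≤ 10800000 then "up" else "degraded"), sm, sh)
    else if row.1 = "a48b54ce-40f6-4e4a-abe8-1e2fa389455b" then
      (el, em, eh, sl, (if row.2 ≤ 2700000 then "up" else "degraded"), sh)
    else if row.1 = "4969a9e9-ddfd-476e-8b93-6231e6f1be4a" then
      (el, em, eh, sl, sm, (if row.2 ≤ 60000 then "up" else "degraded"))
    else (el, em, eh, sl, sm, sh)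

def determine_notification_status (dbresults : List (String × Int)) : String × String :=
  match dbresults.foldl aStep ("down", "down", "down", "down", "down", "down") with
  | (el, em, eh, sl, sm, sh) =>
    let email_status :=
      if el = "down" ∨ em = "down" ∨ eh = "down" then "down"
      else if el = "degraded" ∨ em = "degraded" ∨ eh = "degraded" then "degraded"
      else "up"
    let sms_status :=
      if sl = "down" ∨ sm = "down" ∨ sh = "down" then "down"
      else if sl = "degraded" ∨ sm = "degraded" ∨ sh = "degraded" then "degraded"
      else "up"
    (email_status, sms_status)

-- ===== PORT B =====
-- _level_status: loop over reversed(dbresults), return at first (= last in original) match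
def bLevelStatus (dbresults : List (String × Int)) (templateId : String) (threshold : Int) : String :=
  match dbresults.reverse.find? (fun row => row.1 == templateId) with
  | some row => if row.2 ≤ threshold then "up" else "degraded"
  | none => "down"

def bRank (s : String) : Int := if s = "down" then 0 else if s = "degraded" then 1 else 2

-- Python min(levels, key=_RANK.get): first element of minimal rank
def bMin (l : List String) : String :=
  match l with
  | [] => ""
  | x :: xs => xs.foldl (fun best y => if bRank y < bRank best then y else best) x

-- constant dict lookups inlined as literals, per channel
def determine_notification_status_alt (dbresults : List (String × Int)) : String × String :=
  let email := bMin
    [bLevelStatus dbresults "73079cb9-c169-44ea-8cf4-8d397711cc9d" 10800000,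
     bLevelStatus dbresults "c75c4539-3014-4c4c-96b5-94d326758a74" 2700000,
     bLevelStatus dbresults "276da251-3103-49f3-9054-cbf6b5d74411" 60000]
  let sms := bMin
    [bLevelStatus dbresults "ab3a603b-d602-46ea-8c83-e05cb280b950" 10800000,
     bLevelStatus dbresults "a48b54ce-40f6-4e4a-abe8-1e2fa389455b" 2700000,
     bLevelStatus dbresults "4969a9e9-ddfd-476e-8b93-6231e6f1be4a" 60000]
  (email, sms)

-- ===== PRECONDITION & SPEC =====
def Spec_determine_notification_status (dbresults : List (String × Int)) (out : String × String) : Prop := out = determine_notification_status_alt dbresults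
instance (dbresults : List (String × Int)) (out : String × String) : Decidable (Spec_determine_notification_status dbresults out) := by unfold Spec_determine_notification_status; infer_instance

-- ===== CLAIM (what is proved, stated in full; the proofs are below) =====
def Claim_equal_determine_notification_status : Prop := ∀ (dbresults : List (String × Int)), Dom_determine_notification_status dbresults → Spec_determine_notification_status dbresults (determine_notification_status dbresults)

-- ===== LEMMAS AND PROOFS =====

-- last-report status with an explicit default (generalises bLevelStatus over the fold's state)
def gStat (l : List (String × Int)) (tid : String) (th : Int) (d : String) : String :=
  match l.reverse.find? (fun row => row.1 == tid) with
  | some row => if row.2 ≤ th then "up" else "degraded"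
  | none => d

lemma gStat_cons_eq (row : String × Int) (t : List (String × Int)) (tid : String) (th : Int)
    (d : String) (h : row.1 = tid) :
    gStat (row :: t) tid th d = gStat t tid th (if row.2 ≤ th then "up" else "degraded") := by
  simp only [gStat, List.reverse_cons, List.find?_append]
  cases t.reverse.find? (fun r => r.1 == tid) with
  | none => simp [List.find?, h]
  | some r => rfl

lemma gStat_cons_ne (row : String × Int) (t : List (String × Int)) (tid : String) (th : Int)
    (d : String) (h : ¬ row.1 = tid) :
    gStat (row :: t) tid th d = gStat t tid th d := by
  simp only [gStat, List.reverse_cons, List.find?_append]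
  cases t.reverse.find? (fun r => r.1 == tid) with
  | none => simp [beq_eq_false_iff_ne.mpr h]
  | some r => rfl

lemma fold_eq : ∀ (l : List (String × Int)) (el em eh sl sm sh : String),
    l.foldl aStep (el, em, eh, sl, sm, sh) =
      (gStat l "73079cb9-c169-44ea-8cf4-8d397711cc9d" 10800000 el,
       gStat l "c75c4539-3014-4c4c-96b5-94d326758a74" 2700000 em,
       gStat l "276da251-3103-49f3-9054-cbf6b5d74411" 60000 eh,
       gStat l "ab3a603b-d602-46ea-8c83-e05cb280b950" 10800000 sl,
       gStat l "a48b54ce-40f6-4e4a-abe8-1e2fa389455b" 2700000 sm,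
       gStat l "4969a9e9-ddfd-476e-8b93-6231e6f1be4a" 60000 sh) := by
  intro l
  induction l with
  | nil => intro el em eh sl sm sh; simp [gStat]
  | cons row t ih =>
    intro el em eh sl sm sh
    simp only [List.foldl_cons]
    by_cases c1 : row.1 = "73079cb9-c169-44ea-8cf4-8d397711cc9d"
    · rw [show aStep (el, em, eh, sl, sm, sh) row =
          ((if row.2 ≤ 10800000 then "up" else "degraded"), em, eh, sl, sm, sh) from by
            simp [aStep, c1], ih,
        gStat_cons_eq row t _ _ _ c1,
        gStat_cons_ne row t _ _ _ (by rw [c1]; decide),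
        gStat_cons_ne row t _ _ _ (by rw [c1]; decide),
        gStat_cons_ne row t _ _ _ (by rw [c1]; decide),
        gStat_cons_ne row t _ _ _ (by rw [c1]; decide),
        gStat_cons_ne row t _ _ _ (by rw [c1]; decide)]
    · by_cases c2 : row.1 = "c75c4539-3014-4c4c-96b5-94d326758a74"
      · rw [show aStep (el, em, eh, sl, sm, sh) row =
            (el, (if row.2 ≤ 2700000 then "up" else "degraded"), eh, sl, sm, sh) from by
              simp [aStep, c2], ih,
          gStat_cons_ne row t _ _ _ c1,
          gStat_cons_eq row t _ _ _ c2,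
          gStat_cons_ne row t _ _ _ (by rw [c2]; decide),
          gStat_cons_ne row t _ _ _ (by rw [c2]; decide),
          gStat_cons_ne row t _ _ _ (by rw [c2]; decide),
          gStat_cons_ne row t _ _ _ (by rw [c2]; decide)]
      · by_cases c3 : row.1 = "276da251-3103-49f3-9054-cbf6b5d74411"
        · rw [show aStep (el, em, eh, sl, sm, sh) row =
              (el, em, (if row.2 ≤ 60000 then "up" else "degraded"), sl, sm, sh) from by
                simp [aStep, c3], ih,
            gStat_cons_ne row t _ _ _ c1,
            gStat_cons_ne row t _ _ _ c2,
            gStat_cons_eq row t _ _ _ c3,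
            gStat_cons_ne row t _ _ _ (by rw [c3]; decide),
            gStat_cons_ne row t _ _ _ (by rw [c3]; decide),
            gStat_cons_ne row t _ _ _ (by rw [c3]; decide)]
        · by_cases c4 : row.1 = "ab3a603b-d602-46ea-8c83-e05cb280b950"
          · rw [show aStep (el, em, eh, sl, sm, sh) row =
                (el, em, eh, (if row.2 ≤ 10800000 then "up" else "degraded"), sm, sh) from by
                  simp [aStep, c4], ih,
              gStat_cons_ne row t _ _ _ c1,
              gStat_cons_ne row t _ _ _ c2,
              gStat_cons_ne row t _ _ _ c3,
              gStat_cons_eq row t _ _ _ c4,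
              gStat_cons_ne row t _ _ _ (by rw [c4]; decide),
              gStat_cons_ne row t _ _ _ (by rw [c4]; decide)]
          · by_cases c5 : row.1 = "a48b54ce-40f6-4e4a-abe8-1e2fa389455b"
            · rw [show aStep (el, em, eh, sl, sm, sh) row =
                  (el, em, eh, sl, (if row.2 ≤ 2700000 then "up" else "degraded"), sh) from by
                    simp [aStep, c5], ih,
                gStat_cons_ne row t _ _ _ c1,
                gStat_cons_ne row t _ _ _ c2,
                gStat_cons_ne row t _ _ _ c3,
                gStat_cons_ne row t _ _ _ c4,
                gStat_cons_eq row t _ _ _ c5,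
                gStat_cons_ne row t _ _ _ (by rw [c5]; decide)]
            · by_cases c6 : row.1 = "4969a9e9-ddfd-476e-8b93-6231e6f1be4a"
              · rw [show aStep (el, em, eh, sl, sm, sh) row =
                    (el, em, eh, sl, sm, (if row.2 ≤ 60000 then "up" else "degraded")) from by
                      simp [aStep, c6], ih,
                  gStat_cons_ne row t _ _ _ c1,
                  gStat_cons_ne row t _ _ _ c2,
                  gStat_cons_ne row t _ _ _ c3,
                  gStat_cons_ne row t _ _ _ c4,
                  gStat_cons_ne row t _ _ _ c5,
                  gStat_cons_eq row t _ _ _ c6]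
              · rw [show aStep (el, em, eh, sl, sm, sh) row = (el, em, eh, sl, sm, sh) from by
                      simp [aStep, c1, c2, c3, c4, c5, c6], ih,
                  gStat_cons_ne row t _ _ _ c1,
                  gStat_cons_ne row t _ _ _ c2,
                  gStat_cons_ne row t _ _ _ c3,
                  gStat_cons_ne row t _ _ _ c4,
                  gStat_cons_ne row t _ _ _ c5,
                  gStat_cons_ne row t _ _ _ c6]

lemma bLevelStatus_eq_gStat (l : List (String × Int)) (tid : String) (th : Int) :
    bLevelStatus l tid th = gStat l tid th "down" := rfl

lemma gStat_down_mem (l : List (String × Int)) (tid : String) (th : Int) :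
    gStat l tid th "down" = "down" ∨ gStat l tid th "down" = "degraded" ∨
      gStat l tid th "down" = "up" := by
  unfold gStat
  cases l.reverse.find? (fun row => row.1 == tid) with
  | none => left; rfl
  | some r => by_cases h : r.2 ≤ th <;> simp [h]

lemma bMin_worst (a b c : String)
    (ha : a = "down" ∨ a = "degraded" ∨ a = "up")
    (hb : b = "down" ∨ b = "degraded" ∨ b = "up")
    (hc : c = "down" ∨ c = "degraded" ∨ c = "up") :
    bMin [a, b, c] =
      (if a = "down" ∨ b = "down" ∨ c = "down" then "down"
       else if a = "degraded" ∨ b = "degraded" ∨ c = "degraded" then "degraded"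
       else "up") := by
  rcases ha with rfl | rfl | rfl <;> rcases hb with rfl | rfl | rfl <;>
    rcases hc with rfl | rfl | rfl <;> decide

-- ===== VERDICT (by name: the statement is the Claim_ definition above) =====
theorem determine_notification_status_spec : Claim_equal_determine_notification_status := by
  intro l _
  unfold Spec_determine_notification_status determine_notification_status
    determine_notification_status_alt
  rw [fold_eq]
  simp only [bLevelStatus_eq_gStat]
  refine Prod.ext ?_ ?_ <;> simp only [] <;>
    rw [bMin_worst _ _ _ (gStat_down_mem ..) (gStat_down_mem ..) (gStat_down_mem ..)]
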